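-- pv_equiv track=rewrite | github.com/Codingnaveen46/PRD_Generator | backend/app/services/analyzer.py | _default_file_name
-- ===== SOURCE A (Python) =====
-- def _default_file_name(framework: str, scenario: str) -> str:
--     slug = "".join(char.lower() if char.isalnum() else "-" for char in scenario).strip("-")
--     slug = "-".join(part for part in slug.split("-") if part) or "generated-test"
--     normalized = framework.strip().lower()
--     if normalized == "playwright":
--         return f"{slug}.spec.ts"
--     if normalized == "cypress":
--         return f"{slug}.cy.ts"
--     if normalized == "selenium":
--         return f"{_pascal_case(slug)}Test.java"
--     return f"{slug}.api.spec.ts"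
--
-- def _pascal_case(value: str) -> str:
--     parts = [part for part in value.replace("_", "-").split("-") if part]
--     if not parts:
--         return "Generated"
--     return "".join(part[:1].upper() + part[1:] for part in parts)
-- ===== SOURCE B (Python) =====
-- def _default_file_name(framework: str, scenario: str) -> str:
--     # Single tokenizing pass over scenario instead of map/strip/split/filter/join round-trips.
--     tokens = []
--     cur = ""
--     for ch in scenario:
--         if ch.isalnum():
--             cur += ch.lower()
--         else:
--             if cur:
--                 tokens.append(cur)
--             cur = ""
--     if cur:
--         tokens.append(cur)
--     slug = "-".join(tokens) or "generated-test"
--     normalized = framework.strip().lower()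
--     if normalized == "playwright":
--         return slug + ".spec.ts"
--     if normalized == "cypress":
--         return slug + ".cy.ts"
--     if normalized == "selenium":
--         return "".join(p[:1].upper() + p[1:] for p in slug.split("-")) + "Test.java"
--     return slug + ".api.spec.ts"
-- ===== Notes on version B (the rewrite author's own statement) =====
-- stated objective: alternative
-- what changed: Replaces A's two-stage slug pipeline (map each char to char-or-dash, strip dashes, re-split, filter, re-join) and its generic _pascal_case (replace/split/filter) with one tokenizing pass over scenario that accumulates runs of alphanumerics, joining the token list once; the Selenium branch capitalises the slug's dash-separated parts directly.
import Mathlib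
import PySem

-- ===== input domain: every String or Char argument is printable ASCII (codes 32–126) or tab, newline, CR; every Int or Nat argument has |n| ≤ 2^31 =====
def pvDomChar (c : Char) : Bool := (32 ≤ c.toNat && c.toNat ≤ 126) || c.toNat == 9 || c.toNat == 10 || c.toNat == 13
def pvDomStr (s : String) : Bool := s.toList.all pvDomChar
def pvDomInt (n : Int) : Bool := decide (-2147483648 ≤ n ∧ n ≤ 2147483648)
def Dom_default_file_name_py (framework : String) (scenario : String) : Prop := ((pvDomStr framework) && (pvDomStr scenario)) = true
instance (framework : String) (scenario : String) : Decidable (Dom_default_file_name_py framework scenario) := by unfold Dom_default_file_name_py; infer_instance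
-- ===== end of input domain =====

-- B replaces A's map/strip/split/filter/join slug pipeline by one tokenizing pass (alternative decomposition, same cost).

-- ===== PORT A =====
-- port of _pascal_case
def pascal_case_py (value : List Char) : List Char :=
  let parts := (PySem.Chars.splitOn (PySem.Chars.replace value ['_'] ['-']) ['-']).filter
    (fun part => !part.isEmpty)
  if parts.isEmpty then "Generated".toList
  else PySem.Chars.join [] (parts.map
    (fun part => PySem.Chars.upper (PySem.Chars.slice part none (some 1)) ++ PySem.Chars.slice part (some 1) none))

def default_file_name_py (framework : String) (scenario : String) : String :=
  let slug0 := PySem.Chars.stripChars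
    (scenario.toList.map (fun ch => if PySem.Chars.isalnum ch then PySem.Chars.lowerChar ch else '-')) ['-']
  let slug1 := PySem.Chars.join ['-'] ((PySem.Chars.splitOn slug0 ['-']).filter (fun part => !part.isEmpty))
  let slug := if slug1.isEmpty then "generated-test".toList else slug1
  let normalized := PySem.Chars.lower (PySem.Chars.strip framework.toList)
  if normalized = "playwright".toList then String.ofList (slug ++ ".spec.ts".toList)
  else if normalized = "cypress".toList then String.ofList (slug ++ ".cy.ts".toList)
  else if normalized = "selenium".toList then String.ofList (pascal_case_py slug ++ "Test.java".toList)
  else String.ofList (slug ++ ".api.spec.ts".toList)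

-- ===== PORT B =====
-- one step of B's tokenizing loop over scenario
def dfn_step (st : List (List Char) × List Char) (ch : Char) : List (List Char) × List Char :=
  if PySem.Chars.isalnum ch then (st.1, st.2 ++ [PySem.Chars.lowerChar ch])
  else (if st.2.isEmpty then st.1 else st.1 ++ [st.2], [])

def default_file_name_py_alt (framework : String) (scenario : String) : String :=
  let st := scenario.toList.foldl dfn_step ([], [])
  let tokens := if st.2.isEmpty then st.1 else st.1 ++ [st.2]
  let slug1 := PySem.Chars.join ['-'] tokens
  let slug := if slug1.isEmpty then "generated-test".toList else slug1
  let normalized := PySem.Chars.lower (PySem.Chars.strip framework.toList)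
  if normalized = "playwright".toList then String.ofList (slug ++ ".spec.ts".toList)
  else if normalized = "cypress".toList then String.ofList (slug ++ ".cy.ts".toList)
  else if normalized = "selenium".toList then
    String.ofList (PySem.Chars.join [] ((PySem.Chars.splitOn slug ['-']).map
      (fun p => PySem.Chars.upper (PySem.Chars.slice p none (some 1)) ++ PySem.Chars.slice p (some 1) none)) ++ "Test.java".toList)
  else String.ofList (slug ++ ".api.spec.ts".toList)

-- ===== PRECONDITION & SPEC =====
def Spec_default_file_name_py (framework : String) (scenario : String) (out : String) : Prop := out = default_file_name_py_alt framework scenario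
instance (framework : String) (scenario : String) (out : String) : Decidable (Spec_default_file_name_py framework scenario out) := by unfold Spec_default_file_name_py; infer_instance

-- ===== CLAIM (what is proved, stated in full; the proofs are below) =====
def Claim_equal_default_file_name_py : Prop := ∀ (framework : String) (scenario : String), Dom_default_file_name_py framework scenario → Spec_default_file_name_py framework scenario (default_file_name_py framework scenario)

-- ===== LEMMAS AND PROOFS =====

theorem dfn_toNat_ofNat (n : Nat) (h : n < 55296) : (Char.ofNat n).toNat = n := by
  unfold Char.ofNat
  rw [dif_pos (by simp [Nat.isValidChar]; omega)]
  simp [Char.toNat, Char.ofNatAux]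

-- lowerChar of an alphanumeric char lies in [48,57] ∪ [97,122]
theorem dfn_lowerChar_range (c : Char) (h : PySem.Chars.isalnum c = true) :
    (48 ≤ (PySem.Chars.lowerChar c).toNat ∧ (PySem.Chars.lowerChar c).toNat ≤ 57) ∨
    (97 ≤ (PySem.Chars.lowerChar c).toNat ∧ (PySem.Chars.lowerChar c).toNat ≤ 122) := by
  have hA : ('A').val.toNat = 65 := rfl
  have hZ : ('Z').val.toNat = 90 := rfl
  have ha : ('a').val.toNat = 97 := rfl
  have hz : ('z').val.toNat = 122 := rfl
  have h0 : ('0').val.toNat = 48 := rfl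
  have h9 : ('9').val.toNat = 57 := rfl
  simp only [PySem.Chars.isalnum, PySem.Chars.isalpha, PySem.Chars.isdigit, PySem.Chars.isupper,
    PySem.Chars.islower, Bool.or_eq_true, Bool.and_eq_true, decide_eq_true_eq, Char.le_def,
    UInt32.le_iff_toNat_le, hA, hZ, ha, hz, h0, h9] at h
  unfold PySem.Chars.lowerChar PySem.Chars.isupper
  by_cases hu : ('A' ≤ c ∧ c ≤ 'Z')
  · rw [if_pos (by simp [hu.1, hu.2])]
    obtain ⟨h1, h2⟩ := hu
    rw [Char.le_def, UInt32.le_iff_toNat_le, hA] at h1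
    rw [Char.le_def, UInt32.le_iff_toNat_le, hZ] at h2
    rw [dfn_toNat_ofNat _ (by simp only [Char.toNat] at *; omega)]
    simp only [Char.toNat] at *
    omega
  · rw [if_neg (by simpa [decide_eq_true_eq] using hu)]
    rw [Char.le_def, Char.le_def, UInt32.le_iff_toNat_le, UInt32.le_iff_toNat_le, hA, hZ] at hu
    simp only [Char.toNat] at *
    omega

theorem dfn_lowerChar_ne_dash (c : Char) (h : PySem.Chars.isalnum c = true) :
    (PySem.Chars.lowerChar c == '-') = false := by
  have hr := dfn_lowerChar_range c h
  rw [beq_eq_false_iff_ne]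
  intro e
  have : (PySem.Chars.lowerChar c).toNat = 45 := by rw [e]; rfl
  omega

theorem dfn_lowerChar_ne_underscore (c : Char) (h : PySem.Chars.isalnum c = true) :
    PySem.Chars.lowerChar c ≠ '_' := by
  have hr := dfn_lowerChar_range c h
  intro e
  have : (PySem.Chars.lowerChar c).toNat = 95 := by rw [e]; rfl
  omega

-- PySem's fueled splitOn on a single-char separator is Mathlib's splitOnP
theorem dfn_splitOn_go_eq (d : Char) (fuel : Nat) (l cur : List Char) (acc : List (List Char)) (hf : l.length ≤ fuel) :
    PySem.Chars.splitOn.go [d] fuel l cur acc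
      = acc.reverse ++ List.modifyHead (cur.reverse ++ ·) (List.splitOnP (· == d) l) := by
  induction fuel generalizing l cur acc with
  | zero =>
    have : l = [] := by cases l <;> simp_all
    subst this
    rw [PySem.Chars.splitOn.go]
    simp
  | succ n ih =>
    cases l with
    | nil => rw [PySem.Chars.splitOn.go]; simp; omega
    | cons c rest =>
      rw [PySem.Chars.splitOn.go]
      have hpre : ([d].isPrefixOf (c :: rest)) = (d == c) := by
        simp [List.isPrefixOf]
      rw [hpre]
      by_cases hdc : d = c
      · subst hdc
        rw [if_pos (by simp)]
        rw [ih _ _ _ (by simpa using Nat.le_of_succ_le_succ (by simpa using hf))]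
        rw [List.splitOnP_cons]
        rw [if_pos (by simp)]
        simp only [List.reverse_cons, List.reverse_nil, List.nil_append, List.modifyHead_cons]
        cases h' : List.splitOnP (· == d) rest with
        | nil => exact absurd h' (List.splitOnP_ne_nil _ _)
        | cons a as => simp [h']
      · rw [if_neg (by simp [beq_iff_eq, hdc])]
        rw [ih _ _ _ (by simpa using Nat.le_of_succ_le_succ (by simpa using hf))]
        rw [List.splitOnP_cons, if_neg (by simp [beq_iff_eq]; exact fun e => hdc e.symm)]
        cases h' : List.splitOnP (· == d) rest with
        | nil => exact absurd h' (List.splitOnP_ne_nil _ _)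
        | cons a as => simp

theorem dfn_splitOn_eq (l : List Char) (d : Char) :
    PySem.Chars.splitOn l [d] = List.splitOnP (· == d) l := by
  rw [PySem.Chars.splitOn, dfn_splitOn_go_eq _ _ _ _ _ (by omega)]
  cases h' : List.splitOnP (· == d) l with
  | nil => exact absurd h' (List.splitOnP_ne_nil _ _)
  | cons a as => simp

-- replace is the identity when the (single-char) pattern does not occur
theorem dfn_replace_go_eq (old new : Char) (fuel : Nat) (l acc : List Char)
    (hf : l.length ≤ fuel) (h : old ∉ l) :
    PySem.Chars.replace.go [old] [new] fuel l acc = acc.reverse ++ l := by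
  induction fuel generalizing l acc with
  | zero =>
    have : l = [] := by cases l <;> simp_all
    subst this; rw [PySem.Chars.replace.go]
  | succ n ih =>
    cases l with
    | nil => rw [PySem.Chars.replace.go]; simp; omega
    | cons c rest =>
      rw [PySem.Chars.replace.go]
      rw [if_neg (by
        simp only [List.isPrefixOf, Bool.and_eq_true, beq_iff_eq]
        simp at h
        simp [h.1])]
      rw [ih _ _ (by simpa using Nat.le_of_succ_le_succ (by simpa using hf)) (by simp at h; exact h.2)]
      simp

theorem dfn_replace_eq_self (l : List Char) (old new : Char) (h : old ∉ l) :
    PySem.Chars.replace l [old] [new] = l := by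
  rw [PySem.Chars.replace]
  rw [if_neg (by simp)]
  rw [dfn_replace_go_eq _ _ _ _ _ (by omega) h]
  simp

-- filtered splitOnP of an all-separator list is empty
theorem dfn_filter_splitOnP_allSep (p : Char → Bool) (k : List Char) (hk : ∀ c ∈ k, p c = true) :
    (List.splitOnP p k).filter (fun x => !x.isEmpty) = [] := by
  induction k with
  | nil => simp
  | cons c t ih =>
    rw [List.splitOnP_cons, if_pos (hk c (by simp))]
    simpa using ih (fun c hc => hk c (by simp [hc]))

-- trailing separators do not change the filtered split
theorem dfn_filter_splitOnP_append_right (p : Char → Bool) (m k : List Char)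
    (hk : ∀ c ∈ k, p c = true) :
    ((m ++ k).splitOnP p).filter (fun x => !x.isEmpty) = (m.splitOnP p).filter (fun x => !x.isEmpty) := by
  cases k with
  | nil => simp
  | cons d k' =>
    rw [List.splitOnP_append_cons _ _ _ _ (hk d (by simp))]
    rw [List.filter_append]
    rw [dfn_filter_splitOnP_allSep p k' (fun c hc => hk c (by simp [hc]))]
    simp

-- leading separators do not change the filtered split
theorem dfn_filter_splitOnP_append_left (p : Char → Bool) (m k : List Char)
    (hk : ∀ c ∈ k, p c = true) :
    ((k ++ m).splitOnP p).filter (fun x => !x.isEmpty) = (m.splitOnP p).filter (fun x => !x.isEmpty) := by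
  induction k with
  | nil => simp
  | cons c t ih =>
    rw [List.cons_append, List.splitOnP_cons, if_pos (hk c (by simp))]
    simpa using ih (fun c hc => hk c (by simp [hc]))

-- stripping the separator at both ends does not change the filtered split
theorem dfn_filter_splitOnP_strip (m : List Char) :
    ((PySem.Chars.stripChars m ['-']).splitOnP (· == '-')).filter (fun x => !x.isEmpty)
      = (m.splitOnP (· == '-')).filter (fun x => !x.isEmpty) := by
  rw [PySem.Chars.stripChars]
  have hq : (fun c => List.contains ['-'] c) = (fun c : Char => c == '-') := by
    funext c
    rw [List.contains_cons, List.contains_nil, Bool.or_false]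
  set q := fun c : Char => c == '-' with hqdef
  rw [show (fun c => List.contains ['-'] c) = q from hq]
  set m1 := List.dropWhile q m with hm1
  have hdecomp : m1 = (List.dropWhile q m1.reverse).reverse ++ (List.takeWhile q m1.reverse).reverse := by
    conv_lhs => rw [← List.reverse_reverse m1, ← List.takeWhile_append_dropWhile (p := q) (l := m1.reverse)]
    rw [List.reverse_append]
  have htk : ∀ c ∈ (List.takeWhile q m1.reverse).reverse, q c = true := by
    intro c hc
    rw [List.mem_reverse] at hc
    exact List.mem_takeWhile_imp hc
  have h1 : ((List.dropWhile q m1.reverse).reverse.splitOnP q).filter (fun x => !x.isEmpty)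
      = (m1.splitOnP q).filter (fun x => !x.isEmpty) := by
    conv_rhs => rw [hdecomp]
    rw [dfn_filter_splitOnP_append_right q _ _ htk]
  rw [h1]
  conv_rhs => rw [← List.takeWhile_append_dropWhile (p := q) (l := m)]
  rw [dfn_filter_splitOnP_append_left q _ _ (fun c hc => List.mem_takeWhile_imp hc)]

-- closing B's fold state into the final token list
def dfn_finish (st : List (List Char) × List Char) : List (List Char) :=
  if st.2.isEmpty then st.1 else st.1 ++ [st.2]

-- B's tokenizing fold computes the filtered split of the mapped list
theorem dfn_fold_eq (l : List Char) (toks : List (List Char)) (cur : List Char) :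
    dfn_finish (l.foldl dfn_step (toks, cur))
      = toks ++ (List.modifyHead (cur ++ ·)
          ((l.map (fun ch => if PySem.Chars.isalnum ch then PySem.Chars.lowerChar ch else '-')).splitOnP (· == '-'))).filter
          (fun x => !x.isEmpty) := by
  induction l generalizing toks cur with
  | nil =>
    unfold dfn_finish
    simp only [List.foldl_nil, List.map_nil, List.splitOnP_nil, List.modifyHead_cons, List.append_nil]
    cases hc : cur.isEmpty
    · simp_all
    · simp_all [List.isEmpty_iff]
  | cons c t ih =>
    simp only [List.foldl_cons, List.map_cons]
    by_cases ha : PySem.Chars.isalnum c = true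
    · rw [show dfn_step (toks, cur) c = (toks, cur ++ [PySem.Chars.lowerChar c]) by simp [dfn_step, ha]]
      rw [ih]
      rw [if_pos ha, List.splitOnP_cons, if_neg (by simp [dfn_lowerChar_ne_dash c ha])]
      obtain ⟨h0, r, hr⟩ := List.exists_cons_of_ne_nil
        (List.splitOnP_ne_nil (· == '-') (t.map (fun ch => if PySem.Chars.isalnum ch then PySem.Chars.lowerChar ch else '-')))
      rw [hr]
      simp
    · rw [show dfn_step (toks, cur) c = ((if cur.isEmpty then toks else toks ++ [cur]), []) by
        simp only [dfn_step]; rw [if_neg ha]]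
      rw [ih]
      rw [if_neg ha, List.splitOnP_cons, if_pos (show (('-' : Char) == '-') = true by simp)]
      obtain ⟨h0, r, hr⟩ := List.exists_cons_of_ne_nil
        (List.splitOnP_ne_nil (· == '-') (t.map (fun ch => if PySem.Chars.isalnum ch then PySem.Chars.lowerChar ch else '-')))
      rw [hr]
      by_cases hc : cur = []
      · subst hc; simp
      · simp [hc, List.filter_cons]

-- every char of every piece of splitOnP comes from the list and is not a separator
theorem dfn_mem_splitOnP (p : Char → Bool) (l : List Char) (t : List Char) (c : Char)
    (ht : t ∈ l.splitOnP p) (hc : c ∈ t) : c ∈ l ∧ p c = false := by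
  induction l generalizing t with
  | nil => simp_all
  | cons a l' ih =>
    rw [List.splitOnP_cons] at ht
    by_cases hpa : p a = true
    · rw [if_pos hpa] at ht
      rcases List.mem_cons.mp ht with h | h
      · subst h; simp at hc
      · obtain ⟨h1, h2⟩ := ih t h hc
        exact ⟨by simp [h1], h2⟩
    · rw [if_neg hpa] at ht
      obtain ⟨h0, r, hr⟩ := List.exists_cons_of_ne_nil (List.splitOnP_ne_nil p l')
      rw [hr, List.modifyHead_cons] at ht
      rcases List.mem_cons.mp ht with h | h
      · subst h
        rcases List.mem_cons.mp hc with h | h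
        · subst h
          exact ⟨by simp, by simpa using hpa⟩
        · obtain ⟨h1, h2⟩ := ih h0 (by rw [hr]; simp) h
          exact ⟨by simp [h1], h2⟩
      · obtain ⟨h1, h2⟩ := ih t (by rw [hr]; simp [h]) hc
        exact ⟨by simp [h1], h2⟩

-- A's token list (filtered split of the stripped, mapped scenario) = B's fold result, stated port-side
theorem dfn_slug_core (l : List Char) :
    ((PySem.Chars.splitOn (PySem.Chars.stripChars
        (l.map (fun ch => if PySem.Chars.isalnum ch then PySem.Chars.lowerChar ch else '-')) ['-']) ['-']).filter
      (fun part => !part.isEmpty))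
      = dfn_finish (l.foldl dfn_step ([], [])) := by
  rw [dfn_splitOn_eq, dfn_filter_splitOnP_strip, dfn_fold_eq l [] []]
  have hmh : ∀ X : List (List Char), List.modifyHead (fun x => ([] : List Char) ++ x) X = X := by
    intro X; cases X <;> simp
  rw [hmh]
  simp

-- every final token is nonempty and contains neither '-' nor '_'
theorem dfn_tokens_good (l : List Char) :
    ∀ t ∈ dfn_finish (l.foldl dfn_step ([], [])), t ≠ [] ∧ ∀ c ∈ t, c ≠ '-' ∧ c ≠ '_' := by
  intro t ht
  rw [← dfn_slug_core, List.mem_filter] at ht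
  obtain ⟨ht, hne⟩ := ht
  rw [dfn_splitOn_eq] at ht
  refine ⟨by simpa using hne, ?_⟩
  intro c hc
  obtain ⟨hmem, hnp⟩ := dfn_mem_splitOnP _ _ _ _ ht hc
  -- c is in the stripped list, hence in the mapped list
  have hmem' : c ∈ l.map (fun ch => if PySem.Chars.isalnum ch then PySem.Chars.lowerChar ch else '-') := by
    rw [PySem.Chars.stripChars] at hmem
    rw [List.mem_reverse] at hmem
    have hmem := (List.dropWhile_sublist _).mem hmem
    rw [List.mem_reverse] at hmem
    exact (List.dropWhile_sublist _).mem hmem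
  obtain ⟨a, _, hfa⟩ := List.mem_map.mp hmem'
  by_cases haa : PySem.Chars.isalnum a = true
  · rw [if_pos haa] at hfa
    subst hfa
    exact ⟨by simpa using dfn_lowerChar_ne_dash a haa, dfn_lowerChar_ne_underscore a haa⟩
  · rw [if_neg haa] at hfa
    subst hfa
    simp at hnp

-- intercalate helpers
theorem dfn_intercalate_cons₂ (sep : Char) (a b : List Char) (r : List (List Char)) :
    [sep].intercalate (a :: b :: r) = a ++ sep :: [sep].intercalate (b :: r) := by
  simp [List.intercalate, List.intersperse_cons₂]

theorem dfn_intercalate_single (sep : Char) (a : List Char) : [sep].intercalate [a] = a := by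
  simp [List.intercalate, List.intersperse_single]

theorem dfn_mem_intercalate (x sep : Char) (ts : List (List Char)) (hx : x ∈ [sep].intercalate ts) :
    x = sep ∨ ∃ t ∈ ts, x ∈ t := by
  induction ts with
  | nil => simp [List.intercalate] at hx
  | cons a r ih =>
    cases r with
    | nil =>
      rw [dfn_intercalate_single] at hx
      exact Or.inr ⟨a, by simp, hx⟩
    | cons b r' =>
      rw [dfn_intercalate_cons₂] at hx
      rcases List.mem_append.mp hx with h | h
      · exact Or.inr ⟨a, by simp, h⟩
      · rcases List.mem_cons.mp h with h | h
        · exact Or.inl h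
        · rcases ih h with h | ⟨t, ht, hxt⟩
          · exact Or.inl h
          · exact Or.inr ⟨t, by simp [List.mem_cons.mp ht], hxt⟩

theorem dfn_intercalate_ne_nil (sep : Char) (a : List Char) (r : List (List Char)) (h : a ≠ []) :
    [sep].intercalate (a :: r) ≠ [] := by
  cases r with
  | nil => rw [dfn_intercalate_single]; exact h
  | cons b r' => rw [dfn_intercalate_cons₂]; simp

-- A's pascal-casing of the slug = B's direct capitalisation of the slug's dash-parts
theorem dfn_pascal_eq (tokens : List (List Char))
    (hgood : ∀ t ∈ tokens, t ≠ [] ∧ ∀ c ∈ t, c ≠ '-' ∧ c ≠ '_') :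
    pascal_case_py (if (PySem.Chars.join ['-'] tokens).isEmpty then "generated-test".toList
        else PySem.Chars.join ['-'] tokens)
      = PySem.Chars.join [] ((PySem.Chars.splitOn
          (if (PySem.Chars.join ['-'] tokens).isEmpty then "generated-test".toList
            else PySem.Chars.join ['-'] tokens) ['-']).map
          (fun p => PySem.Chars.upper (PySem.Chars.slice p none (some 1)) ++ PySem.Chars.slice p (some 1) none)) := by
  cases tokens with
  | nil =>
    rw [show PySem.Chars.join ['-'] [] = [] by simp [PySem.Chars.join, List.intercalate]]
    decide
  | cons t0 rest =>
    have ht0 := hgood t0 (by simp)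
    rw [PySem.Chars.join]
    rw [if_neg (by simpa [List.isEmpty_iff] using dfn_intercalate_ne_nil '-' t0 rest ht0.1)]
    have hnodash : ∀ l ∈ t0 :: rest, '-' ∉ l := by
      intro l hl hmem
      exact ((hgood l hl).2 '-' hmem).1 rfl
    have hsplit : PySem.Chars.splitOn (['-'].intercalate (t0 :: rest)) ['-'] = t0 :: rest := by
      rw [dfn_splitOn_eq]
      rw [show (List.splitOnP (· == '-') (['-'].intercalate (t0 :: rest)))
          = (['-'].intercalate (t0 :: rest)).splitOn '-' by simp [List.splitOn]]
      exact List.splitOn_intercalate (t0 :: rest) '-' hnodash (by simp)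
    rw [hsplit]
    -- A side
    rw [pascal_case_py]
    have hrepl : PySem.Chars.replace (['-'].intercalate (t0 :: rest)) ['_'] ['-']
        = ['-'].intercalate (t0 :: rest) := by
      apply dfn_replace_eq_self
      intro hmem
      rcases dfn_mem_intercalate '_' '-' _ hmem with h | ⟨t, ht, hxt⟩
      · exact absurd h (by decide)
      · exact ((hgood t ht).2 '_' hxt).2 rfl
    rw [hrepl, hsplit]
    have hfilter : (t0 :: rest).filter (fun part => !part.isEmpty) = t0 :: rest := by
      rw [List.filter_eq_self]
      intro a ha
      simpa [List.isEmpty_iff] using (hgood a ha).1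
    rw [hfilter]
    rw [if_neg (by simp)]

-- ===== VERDICT (by name: the statement is the Claim_ definition above) =====
theorem default_file_name_py_spec : Claim_equal_default_file_name_py := by
  intro framework scenario _
  unfold Spec_default_file_name_py default_file_name_py default_file_name_py_alt
  simp only []
  have hslug := dfn_slug_core scenario.toList
  unfold dfn_finish at hslug
  rw [hslug]
  set tokens := (if (scenario.toList.foldl dfn_step ([], [])).2.isEmpty
      then (scenario.toList.foldl dfn_step ([], [])).1
      else (scenario.toList.foldl dfn_step ([], [])).1 ++ [(scenario.toList.foldl dfn_step ([], [])).2])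
    with htokens
  have hgood : ∀ t ∈ tokens, t ≠ [] ∧ ∀ c ∈ t, c ≠ '-' ∧ c ≠ '_' := by
    rw [htokens]
    have := dfn_tokens_good scenario.toList
    unfold dfn_finish at this
    exact this
  have hpas := dfn_pascal_eq tokens hgood
  by_cases h1 : PySem.Chars.lower (PySem.Chars.strip framework.toList) = "playwright".toList
  · rw [if_pos h1, if_pos h1]
  · by_cases h2 : PySem.Chars.lower (PySem.Chars.strip framework.toList) = "cypress".toList
    · rw [if_neg h1, if_neg h1, if_pos h2, if_pos h2]
    · by_cases h3 : PySem.Chars.lower (PySem.Chars.strip framework.toList) = "selenium".toList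
      · rw [if_neg h1, if_neg h1, if_neg h2, if_neg h2, if_pos h3, if_pos h3, hpas]
      · rw [if_neg h1, if_neg h1, if_neg h2, if_neg h2, if_neg h3, if_neg h3]
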